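-- pv_equiv track=rewrite | github.com/TTTkinght/The-Babel-Brief | main.py | remove_markdown_section
-- ===== SOURCE A (Python) =====
-- from typing import Dict, List, Optional, Sequence, Tuple
--
-- def remove_markdown_section(md_text: str, section_title: str) -> str:
--     lines = md_text.splitlines()
--     rebuilt: List[str] = []
--     index = 0
--     while index < len(lines):
--         if lines[index].strip() == section_title:
--             index += 1
--             while index < len(lines):
--                 candidate = lines[index].strip()
--                 if candidate.startswith("## ") and candidate != section_title:
--                     break
--                 index += 1
--             continue
--         rebuilt.append(lines[index])
--         index += 1
--     return "\n".join(rebuilt).strip()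
-- ===== SOURCE B (Python) =====
-- def remove_markdown_section(md_text: str, section_title: str) -> str:
--     # Stage 1: parse the document into blocks, opening a new block at every
--     # line that is the section title or a different '## ' header.
--     done = []
--     cur = []
--     for line in md_text.splitlines():
--         s = line.strip()
--         if s == section_title or (s.startswith("## ") and s != section_title):
--             done.append(cur)
--             cur = [line]
--         else:
--             cur.append(line)
--     done.append(cur)
--     # Stage 2: drop every block whose first line is the section title.
--     kept = []
--     for block in done:
--         if not (block and block[0].strip() == section_title):
--             kept.extend(block)
--     return "\n".join(kept).strip()
-- ===== Notes on version B (the rewrite author's own statement) =====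
-- stated objective: alternative
-- what changed: Replaces A's streaming index scan with an inner skip loop by a two-stage pipeline: first split the document into blocks opening a new block at every title line or distinct '## ' header, then drop every block whose first line is the title and rejoin the rest.
import Mathlib
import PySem

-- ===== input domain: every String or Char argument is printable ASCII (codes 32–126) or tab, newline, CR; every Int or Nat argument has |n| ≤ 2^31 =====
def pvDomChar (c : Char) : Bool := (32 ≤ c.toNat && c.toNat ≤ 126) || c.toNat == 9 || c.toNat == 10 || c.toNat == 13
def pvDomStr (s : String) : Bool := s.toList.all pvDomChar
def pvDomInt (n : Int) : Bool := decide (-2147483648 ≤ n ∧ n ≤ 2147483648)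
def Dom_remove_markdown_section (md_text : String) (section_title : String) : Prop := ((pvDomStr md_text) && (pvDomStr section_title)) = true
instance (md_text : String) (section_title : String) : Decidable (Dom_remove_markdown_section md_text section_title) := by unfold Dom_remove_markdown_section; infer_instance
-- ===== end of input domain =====

-- B replaces A's streaming index scan with an inner skip loop by a two-stage pipeline:
-- split into blocks at every title/distinct-header line, then drop title-headed blocks (objective: alternative).

-- ===== PORT A =====
-- inner 'while index < len(lines): candidate = ...; if ...: break; index += 1' — returns the new index
def pvASkip (title : String) (lines : List String) (index : Nat) : Nat :=
  if h : index < lines.length then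
    let candidate := PySem.Str.strip lines[index]
    if PySem.Str.startswith candidate "## " && !(candidate == title) then index
    else pvASkip title lines (index + 1)
  else index
termination_by lines.length - index

-- needed by pvALoop's termination proof
theorem pvASkip_ge (title : String) (lines : List String) (index : Nat) :
    index ≤ pvASkip title lines index := by
  rw [pvASkip]
  split
  · dsimp only
    split
    · exact Nat.le_refl _
    · exact Nat.le_trans (Nat.le_succ _) (pvASkip_ge title lines (index + 1))
  · exact Nat.le_refl _
termination_by lines.length - index

-- outer 'while index < len(lines)' with the rebuilt accumulator
def pvALoop (title : String) (lines : List String) (index : Nat) (rebuilt : List String) : List String :=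
  if h : index < lines.length then
    if PySem.Str.strip lines[index] == title then
      pvALoop title lines (pvASkip title lines (index + 1)) rebuilt
    else
      pvALoop title lines (index + 1) (rebuilt ++ [lines[index]])
  else rebuilt
termination_by lines.length - index
decreasing_by
  · have := pvASkip_ge title lines (index + 1); omega
  · omega

def remove_markdown_section (md_text : String) (section_title : String) : String :=
  let lines := PySem.Str.splitlines md_text
  PySem.Str.strip (PySem.Str.join "\n" (pvALoop section_title lines 0 []))

-- ===== PORT B =====
-- stage 1: the for-loop over splitlines; python's (done, cur) pair, blocks = done ++ [cur] at the end
def pvBSplit (title : String) : List String → List (List String) → List String → List (List String)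
  | [], done, cur => done ++ [cur]
  | line :: rest, done, cur =>
    let s := PySem.Str.strip line
    if s == title || (PySem.Str.startswith s "## " && !(s == title)) then
      pvBSplit title rest (done ++ [cur]) [line]
    else
      pvBSplit title rest done (cur ++ [line])

-- 'block and block[0].strip() == section_title'
def pvBDrop (title : String) (block : List String) : Bool :=
  match block with
  | [] => false
  | h :: _ => PySem.Str.strip h == title

-- stage 2: the filtering for-loop with kept.extend
def pvBKeep (title : String) (blocks : List (List String)) : List String :=
  blocks.foldl (fun kept block => if pvBDrop title block then kept else kept ++ block) []

def remove_markdown_section_alt (md_text : String) (section_title : String) : String :=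
  PySem.Str.strip (PySem.Str.join "\n"
    (pvBKeep section_title (pvBSplit section_title (PySem.Str.splitlines md_text) [] [])))

-- ===== PRECONDITION & SPEC =====
def Spec_remove_markdown_section (md_text : String) (section_title : String) (out : String) : Prop := out = remove_markdown_section_alt md_text section_title
instance (md_text : String) (section_title : String) (out : String) : Decidable (Spec_remove_markdown_section md_text section_title out) := by unfold Spec_remove_markdown_section; infer_instance

-- ===== CLAIM (what is proved, stated in full; the proofs are below) =====
def Claim_equal_remove_markdown_section : Prop := ∀ (md_text : String) (section_title : String), Dom_remove_markdown_section md_text section_title → Spec_remove_markdown_section md_text section_title (remove_markdown_section md_text section_title)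

-- ===== LEMMAS AND PROOFS =====

-- proof-only intermediate: one pass with a skip flag, bridging A's index loop and B's pipeline
def pvMid (title : String) : List String → Bool → List String → List String
  | [], _, rebuilt => rebuilt
  | line :: rest, skip, rebuilt =>
    let s := PySem.Str.strip line
    if s == title then pvMid title rest true rebuilt
    else if skip then
      if PySem.Str.startswith s "## " then pvMid title rest false (rebuilt ++ [line])
      else pvMid title rest true rebuilt
    else pvMid title rest false (rebuilt ++ [line])

theorem pvLoop_agree (title : String) (lines : List String) :
    ∀ n index rebuilt, lines.length - index ≤ n →
      (pvALoop title lines index rebuilt = pvMid title (lines.drop index) false rebuilt) ∧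
      (pvALoop title lines (pvASkip title lines index) rebuilt = pvMid title (lines.drop index) true rebuilt) := by
  intro n
  induction n with
  | zero =>
    intro index rebuilt h
    have hge : lines.length ≤ index := by omega
    have hnlt : ¬ index < lines.length := by omega
    rw [List.drop_eq_nil_of_le hge]
    constructor
    · rw [pvALoop, dif_neg hnlt]; rfl
    · rw [pvASkip, dif_neg hnlt, pvALoop, dif_neg hnlt]; rfl
  | succ n ih =>
    intro index rebuilt h
    by_cases hlt : index < lines.length
    · have hdrop : lines.drop index = lines[index] :: lines.drop (index + 1) :=
        List.drop_eq_getElem_cons hlt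
      have hrec : lines.length - (index + 1) ≤ n := by omega
      constructor
      · rw [pvALoop, dif_pos hlt, hdrop]
        by_cases ht : PySem.Str.strip lines[index] == title
        · rw [if_pos ht]
          simp only [pvMid, ht, if_pos]
          exact (ih (index + 1) rebuilt hrec).2
        · rw [if_neg ht]
          simp only [pvMid, ht, Bool.false_eq_true, if_false]
          exact (ih (index + 1) (rebuilt ++ [lines[index]]) hrec).1
      · rw [pvASkip, dif_pos hlt]
        by_cases hc : PySem.Str.startswith (PySem.Str.strip lines[index]) "## " &&
            !(PySem.Str.strip lines[index] == title)
        · rw [if_pos hc]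
          obtain ⟨hsw, hny⟩ := (Bool.and_eq_true _ _).mp hc
          have hne : ¬ (PySem.Str.strip lines[index] == title) = true := by
            intro hti; rw [hti] at hny; exact Bool.false_ne_true hny
          rw [pvALoop, dif_pos hlt, if_neg hne, hdrop]
          simp only [pvMid, hne, if_false, hsw, if_pos, Bool.false_eq_true]
          exact (ih (index + 1) (rebuilt ++ [lines[index]]) hrec).1
        · rw [if_neg hc, hdrop]
          by_cases ht : PySem.Str.strip lines[index] == title
          · simp only [pvMid, ht, if_pos]
            exact (ih (index + 1) rebuilt hrec).2
          · have hbf : (PySem.Str.strip lines[index] == title) = false := Bool.eq_false_iff.mpr ht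
            have hsw : ¬ PySem.Str.startswith (PySem.Str.strip lines[index]) "## " = true := by
              intro hs; apply hc; rw [hs, hbf]; rfl
            simp only [pvMid, ht, Bool.false_eq_true, if_false, hsw, if_true]
            exact (ih (index + 1) rebuilt hrec).2
    · have hge : lines.length ≤ index := by omega
      have hnlt : ¬ index < lines.length := hlt
      rw [List.drop_eq_nil_of_le hge]
      constructor
      · rw [pvALoop, dif_neg hnlt]; rfl
      · rw [pvASkip, dif_neg hnlt, pvALoop, dif_neg hnlt]; rfl

-- stage-2 foldl over blocks ++ [b]: dropped block adds nothing
theorem pvBKeep_append_drop (title : String) (blocks : List (List String)) (b : List String)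
    (h : pvBDrop title b = true) :
    pvBKeep title (blocks ++ [b]) = pvBKeep title blocks := by
  unfold pvBKeep
  rw [List.foldl_append, List.foldl_cons, List.foldl_nil, h]
  exact if_pos rfl

-- stage-2 foldl over blocks ++ [b]: kept block is appended
theorem pvBKeep_append_keep (title : String) (blocks : List (List String)) (b : List String)
    (h : pvBDrop title b = false) :
    pvBKeep title (blocks ++ [b]) = pvBKeep title blocks ++ b := by
  unfold pvBKeep
  rw [List.foldl_append, List.foldl_cons, List.foldl_nil, h]
  exact if_neg Bool.false_ne_true

-- the block pipeline agrees with the skip-flag pass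
theorem pvSplit_keep_agree (title : String) :
    ∀ (rest : List String) (done : List (List String)) (cur : List String),
      pvBKeep title (pvBSplit title rest done cur)
        = pvMid title rest (pvBDrop title cur) (pvBKeep title (done ++ [cur])) := by
  intro rest
  induction rest with
  | nil => intro done cur; rfl
  | cons line rest ih =>
    intro done cur
    simp only [pvBSplit, pvMid]
    by_cases ht : (PySem.Str.strip line == title) = true
    · have hm : (PySem.Str.strip line == title
          || (PySem.Str.startswith (PySem.Str.strip line) "## " && !(PySem.Str.strip line == title))) = true := by
        rw [ht]; rfl
      have h1 : pvBDrop title [line] = true := by simp only [pvBDrop, ht]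
      rw [if_pos hm, ih, pvBKeep_append_drop title _ _ h1, h1, if_pos ht]
    · have hbf : (PySem.Str.strip line == title) = false := Bool.eq_false_iff.mpr ht
      have h1 : pvBDrop title [line] = false := by simp only [pvBDrop, hbf]
      by_cases hsw : PySem.Str.startswith (PySem.Str.strip line) "## " = true
      · have hm : (PySem.Str.strip line == title
            || (PySem.Str.startswith (PySem.Str.strip line) "## " && !(PySem.Str.strip line == title))) = true := by
          rw [hbf, hsw]; rfl
        rw [if_pos hm, ih, pvBKeep_append_keep title _ _ h1, h1, if_neg ht]
        cases hcur : pvBDrop title cur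
        · rw [if_neg (by simp : ¬(false : Bool) = true)]
        · rw [if_pos rfl, if_pos hsw]
      · have hswf : PySem.Str.startswith (PySem.Str.strip line) "## " = false := Bool.eq_false_iff.mpr hsw
        have hm : ¬ (PySem.Str.strip line == title
            || (PySem.Str.startswith (PySem.Str.strip line) "## " && !(PySem.Str.strip line == title))) = true := by
          rw [hbf, hswf]; exact Bool.false_ne_true
        have hcur : pvBDrop title (cur ++ [line]) = pvBDrop title cur := by
          cases cur with
          | nil => simp only [List.nil_append, pvBDrop, hbf]
          | cons h t => rfl
        rw [if_neg hm, ih, hcur, if_neg ht]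
        cases hs : pvBDrop title cur
        · have hkl : pvBDrop title (cur ++ [line]) = false := by rw [hcur, hs]
          rw [pvBKeep_append_keep title _ _ hkl, pvBKeep_append_keep title _ _ hs,
            if_neg (by simp : ¬(false : Bool) = true), List.append_assoc]
        · have hkl : pvBDrop title (cur ++ [line]) = true := by rw [hcur, hs]
          rw [pvBKeep_append_drop title _ _ hkl, pvBKeep_append_drop title _ _ hs,
            if_pos rfl, if_neg hsw]

-- ===== VERDICT (by name: the statement is the Claim_ definition above) =====
theorem remove_markdown_section_spec : Claim_equal_remove_markdown_section := by
  intro md_text section_title _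
  unfold Spec_remove_markdown_section remove_markdown_section remove_markdown_section_alt
  have hA := (pvLoop_agree section_title (PySem.Str.splitlines md_text)
    (PySem.Str.splitlines md_text).length 0 [] (by omega)).1
  simp only [List.drop_zero] at hA
  have hB := pvSplit_keep_agree section_title (PySem.Str.splitlines md_text) [] []
  have hd : pvBDrop section_title [] = false := rfl
  rw [hd] at hB
  have hk : pvBKeep section_title (([] : List (List String)) ++ [[]]) = [] := rfl
  rw [hk] at hB
  rw [hB, ← hA]
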